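-- pv_equiv track=rewrite | github.com/daniel-reich/turbo-robot | gphnuvoHDANN2Fmca_13.py | odd_sort
-- ===== SOURCE A (Python) =====
-- def odd_sort(lst):
--   evenindexes = list([x for x in range(len(lst)) if lst[x] % 2 == 0])
--   evennumbers = list([x for x in lst if x % 2 == 0])
--   newlist = []
--   while len(newlist) != len(lst):
--     newlist.append('')
--   oddindexes = list([x for x in range(len(lst)) if lst[x] % 2 != 0])
--   oddnumbers = sorted(list([x for x in lst if x % 2 != 0]))
--   increment = 0
--   for eachnumber in evenindexes:
--     newlist[eachnumber] = evennumbers[increment]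
--     increment += 1
--   increment = 0
--   for eachnumber in oddindexes:
--     newlist[eachnumber] = oddnumbers[increment]
--     increment += 1
--   return newlist
-- ===== SOURCE B (Python) =====
-- def odd_sort(lst):
--   res = list(lst)
--   for i in range(len(res)):
--     if res[i] % 2 != 0:
--       m = i
--       for j in range(i + 1, len(res)):
--         if res[j] % 2 != 0 and res[j] < res[m]:
--           m = j
--       res[i], res[m] = res[m], res[i]
--   return res
-- ===== Notes on version B (the rewrite author's own statement) =====
-- stated objective: alternative
-- what changed: B does an in-place selection sort over the odd-valued slots (repeatedly swap the minimum remaining odd value into the leftmost unfixed odd position), with no sorted() call, no placeholder prefill and no index/value bookkeeping lists; it trades A's O(n log n) library sort for an O(n^2) comparison scan.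
import Mathlib
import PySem

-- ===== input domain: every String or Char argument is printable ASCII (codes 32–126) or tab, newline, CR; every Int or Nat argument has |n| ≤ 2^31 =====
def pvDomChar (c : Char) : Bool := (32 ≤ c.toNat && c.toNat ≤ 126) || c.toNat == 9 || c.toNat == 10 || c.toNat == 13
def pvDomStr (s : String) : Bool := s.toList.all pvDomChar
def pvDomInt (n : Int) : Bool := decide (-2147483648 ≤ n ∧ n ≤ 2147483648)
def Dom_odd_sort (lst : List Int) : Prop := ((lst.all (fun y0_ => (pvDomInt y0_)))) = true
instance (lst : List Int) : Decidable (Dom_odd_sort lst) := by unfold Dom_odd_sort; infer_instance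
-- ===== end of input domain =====

-- B replaces A's sort-odds-then-redistribute (placeholder prefill, index lists, two fill
-- loops) by an in-place selection sort over the odd-valued slots (objective: alternative;
-- B is O(n^2) where A is O(n log n)). Equivalence of return values is proved.

-- ===== PORT A =====
-- Python builds newlist of '' placeholders with a while loop; every position is later
-- overwritten (each index is either even- or odd-valued), so the placeholder is ported as 0.
-- The two 'increment' fill loops pair indexes with values in order: ported as foldl over zip.
def odd_sort (lst : List Int) : List Int :=
  let evenindexes := (List.range lst.length).filter (fun x => PySem.Int.mod (lst.getD x 0) 2 == 0)
  let evennumbers := lst.filter (fun x => PySem.Int.mod x 2 == 0)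
  let newlist := List.replicate lst.length (0 : Int)
  let oddindexes := (List.range lst.length).filter (fun x => PySem.Int.mod (lst.getD x 0) 2 != 0)
  let oddnumbers := PySem.List.sorted (lst.filter (fun x => PySem.Int.mod x 2 != 0)) (fun x => x) false
  let newlist := (evenindexes.zip evennumbers).foldl (fun a q => a.set q.1 q.2) newlist
  (oddindexes.zip oddnumbers).foldl (fun a q => a.set q.1 q.2) newlist

-- ===== PORT B =====
-- Source B's inner loop 'for j in range(i+1, n)': scan the tail tracking the best value so far
-- (res[m]) and, once it moves off i, the best index into the tail (some j; none = still i)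
def selScan : List Int → Nat → Int → Option Nat → Int × Option Nat
  | [], _, b, mi => (b, mi)
  | y :: ys, j, b, mi =>
    if PySem.Int.mod y 2 ≠ 0 ∧ y < b then selScan ys (j + 1) y (some j)
    else selScan ys (j + 1) b mi

-- Source B's outer loop: even slots are left alone; for an odd slot, the minimum remaining odd
-- value is swapped in (res[i], res[m] = res[m], res[i] → the old head lands at index m)
def selGo : List Int → List Int
  | [] => []
  | x :: xs =>
    if PySem.Int.mod x 2 ≠ 0 then
      match selScan xs 0 x none with
      | (_, none) => x :: selGo xs
      | (b, some j) => b :: selGo (xs.set j x)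
    else x :: selGo xs
termination_by l => l.length
decreasing_by all_goals simp [List.length_set]

def odd_sort_alt (lst : List Int) : List Int := selGo lst

-- ===== PRECONDITION & SPEC =====
def Spec_odd_sort (lst : List Int) (out : List Int) : Prop := out = odd_sort_alt lst
instance (lst : List Int) (out : List Int) : Decidable (Spec_odd_sort lst out) := by unfold Spec_odd_sort; infer_instance

-- ===== CLAIM (what is proved, stated in full; the proofs are below) =====
def Claim_equal_odd_sort : Prop := ∀ (lst : List Int), Dom_odd_sort lst → Spec_odd_sort lst (odd_sort lst)

-- ===== LEMMAS AND PROOFS =====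

theorem pv_mod2 (a : Int) : PySem.Int.mod a 2 = a % 2 :=
  PySem.Int.mod_eq_emod_of_pos (by norm_num)

-- proof-only bridge: keep evens positionally, consume a stream at the odd slots
def oddSortGo : List Int → List Int → List Int
  | [], _ => []
  | x :: xs, os =>
    if PySem.Int.mod x 2 != 0 then
      match os with
      | o :: rest => o :: oddSortGo xs rest
      | [] => []
    else x :: oddSortGo xs os

-- setting through shifted indexes skips the head
theorem pv_shift_foldl (pairs : List (Nat × Int)) (y : Int) (base : List Int) :
    (pairs.map (fun q => (q.1 + 1, q.2))).foldl (fun a q => a.set q.1 q.2) (y :: base)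
      = y :: pairs.foldl (fun a q => a.set q.1 q.2) base := by
  induction pairs generalizing base with
  | nil => rfl
  | cons p ps ih => simp [List.foldl_cons, List.set, ih]

theorem pv_zip_map_succ (idx : List Nat) (vals : List Int) :
    (idx.map (· + 1)).zip vals = (idx.zip vals).map (fun q => (q.1 + 1, q.2)) := by
  induction idx generalizing vals with
  | nil => rfl
  | cons i is ih => cases vals with
    | nil => rfl
    | cons v vs => simp [List.zip_cons_cons, ih]

-- A's build-indexes-then-fill computation, run with an arbitrary stream os of the right
-- length in place of the sorted odds, equals the positional pass oddSortGo
theorem pv_core (lst os : List Int)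
    (hlen : os.length = (lst.filter (fun x => x % 2 != 0)).length) :
    (((List.range lst.length).filter (fun i => (lst.getD i 0) % 2 != 0)).zip os).foldl
        (fun a q => a.set q.1 q.2)
        ((((List.range lst.length).filter (fun i => (lst.getD i 0) % 2 == 0)).zip
            (lst.filter (fun x => x % 2 == 0))).foldl (fun a q => a.set q.1 q.2)
          (List.replicate lst.length (0 : Int)))
      = oddSortGo lst os := by
  induction lst generalizing os with
  | nil => cases os <;> rfl
  | cons x xs ih =>
    have hrange : List.range (xs.length + 1) = 0 :: (List.range xs.length).map (· + 1) :=
      by simpa [Nat.succ_eq_add_one] using List.range_succ_eq_map (n := xs.length)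
    by_cases hx : x % 2 = 0
    · -- x even
      have hfe : (List.range (xs.length + 1)).filter (fun i => ((x :: xs).getD i 0) % 2 == 0)
          = 0 :: ((List.range xs.length).filter (fun i => (xs.getD i 0) % 2 == 0)).map (· + 1) := by
        rw [hrange]; simp [List.filter_map, Function.comp_def, hx]
      have hfo : (List.range (xs.length + 1)).filter (fun i => ((x :: xs).getD i 0) % 2 != 0)
          = ((List.range xs.length).filter (fun i => (xs.getD i 0) % 2 != 0)).map (· + 1) := by
        rw [hrange]; simp [List.filter_map, Function.comp_def, hx]
      have hve : (x :: xs).filter (fun y => y % 2 == 0) = x :: xs.filter (fun y => y % 2 == 0) := by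
        simp [hx]
      have hlen' : os.length = (xs.filter (fun y => y % 2 != 0)).length := by
        simpa [hx] using hlen
      simp only [List.length_cons]
      rw [hfe, hfo, hve, List.zip_cons_cons, pv_zip_map_succ, pv_zip_map_succ]
      simp only [List.replicate_succ, List.foldl_cons, List.set_cons_zero]
      rw [pv_shift_foldl, pv_shift_foldl, ih os hlen']
      simp [oddSortGo, hx]
    · -- x odd
      have hx1 : x % 2 = 1 := by omega
      cases os with
      | nil =>
        exfalso
        simp [hx1] at hlen
      | cons o os' =>
        have hfe : (List.range (xs.length + 1)).filter (fun i => ((x :: xs).getD i 0) % 2 == 0)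
            = ((List.range xs.length).filter (fun i => (xs.getD i 0) % 2 == 0)).map (· + 1) := by
          rw [hrange]; simp [List.filter_map, Function.comp_def, hx1]
        have hfo : (List.range (xs.length + 1)).filter (fun i => ((x :: xs).getD i 0) % 2 != 0)
            = 0 :: ((List.range xs.length).filter (fun i => (xs.getD i 0) % 2 != 0)).map (· + 1) := by
          rw [hrange]; simp [List.filter_map, Function.comp_def, hx1]
        have hve : (x :: xs).filter (fun y => y % 2 == 0) = xs.filter (fun y => y % 2 == 0) := by
          simp [hx1]
        have hlen' : os'.length = (xs.filter (fun y => y % 2 != 0)).length := by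
          simpa [List.filter_cons, hx1] using hlen
        simp only [List.length_cons]
        rw [hfe, hfo, hve, pv_zip_map_succ]
        simp only [List.replicate_succ]
        rw [pv_shift_foldl, List.zip_cons_cons, pv_zip_map_succ, List.foldl_cons]
        simp only [List.set_cons_zero]
        rw [pv_shift_foldl, ih os' hlen']
        simp [oddSortGo, hx1]

-- full characterisation of the inner scan: either nothing beat the head (result (b, mi),
-- and b is ≤ every odd element of xs), or the first occurrence of the minimum odd value
-- r < b was recorded at offset k
theorem selScan_spec (xs : List Int) (j : Nat) (b : Int) (mi : Option Nat) :
    (selScan xs j b mi = (b, mi) ∧ ∀ y ∈ xs, y % 2 = 1 → b ≤ y)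
    ∨ (∃ k r, xs[k]? = some r ∧ r % 2 = 1 ∧ r < b ∧
        selScan xs j b mi = (r, some (j + k)) ∧ ∀ y ∈ xs, y % 2 = 1 → r ≤ y) := by
  induction xs generalizing j b mi with
  | nil => exact Or.inl ⟨rfl, by simp⟩
  | cons y ys ih =>
    by_cases hc : y % 2 ≠ 0 ∧ y < b
    · have hstep : selScan (y :: ys) j b mi = selScan ys (j + 1) y (some j) := by
        simp [selScan, hc]
      have hyodd : y % 2 = 1 := by rcases Int.emod_two_eq y with h | h; exact absurd h hc.1; exact h
      rcases ih (j + 1) y (some j) with ⟨heq, hge⟩ | ⟨k, r, hget, hrodd, hrlt, heq, hge⟩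
      · refine Or.inr ⟨0, y, rfl, hyodd, hc.2, ?_, ?_⟩
        · rw [hstep, heq]; simp
        · intro z hz hzodd
          rcases List.mem_cons.mp hz with rfl | h
          · exact le_refl z
          · exact hge z h hzodd
      · refine Or.inr ⟨k + 1, r, by simpa using hget, hrodd, lt_trans hrlt hc.2, ?_, ?_⟩
        · rw [hstep, heq]; congr 2; omega
        · intro z hz hzodd
          rcases List.mem_cons.mp hz with rfl | h
          · exact le_of_lt hrlt
          · exact hge z h hzodd
    · have hstep : selScan (y :: ys) j b mi = selScan ys (j + 1) b mi := by
        simp only [selScan, pv_mod2]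
        rw [if_neg hc]
      have hby : y % 2 = 1 → b ≤ y := by
        intro hy
        by_contra hlt
        exact hc ⟨by omega, by omega⟩
      rcases ih (j + 1) b mi with ⟨heq, hge⟩ | ⟨k, r, hget, hrodd, hrlt, heq, hge⟩
      · refine Or.inl ⟨by rw [hstep, heq], ?_⟩
        intro z hz hzodd
        rcases List.mem_cons.mp hz with rfl | h
        · exact hby hzodd
        · exact hge z h hzodd
      · refine Or.inr ⟨k + 1, r, by simpa using hget, hrodd, hrlt, ?_, ?_⟩
        · rw [hstep, heq]; congr 2; omega
        · intro z hz hzodd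
          rcases List.mem_cons.mp hz with rfl | h
          · exact le_of_lt (lt_of_lt_of_le hrlt (hby hzodd))
          · exact hge z h hzodd

-- replacing one odd value by another odd value does not change oddSortGo
theorem oddSortGo_set (xs : List Int) (k : Nat) (r x : Int)
    (hget : xs[k]? = some r) (hr : r % 2 = 1) (hx : x % 2 = 1) :
    ∀ os, oddSortGo (xs.set k x) os = oddSortGo xs os := by
  induction xs generalizing k with
  | nil => simp at hget
  | cons y ys ih =>
    cases k with
    | zero =>
      have hy : y = r := by simpa using hget
      subst hy
      intro os
      cases os with
      | nil => simp [oddSortGo, hr, hx]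
      | cons o rest => simp [oddSortGo, hr, hx]
    | succ k =>
      intro os
      have hget' : ys[k]? = some r := by simpa using hget
      by_cases hy : y % 2 = 0
      · simp [oddSortGo, hy, ih k hget' os]
      · have hy1 : y % 2 = 1 := by rcases Int.emod_two_eq y with h | h; exact absurd h hy; exact h
        cases os with
        | nil => simp [oddSortGo, hy1]
        | cons o rest => simp [oddSortGo, hy1, ih k hget' rest]

-- the filtered odds of xs.set k x: the occurrence of r coming from index k becomes x
theorem filter_set (xs : List Int) (k : Nat) (r x : Int)
    (hget : xs[k]? = some r) (hr : r % 2 = 1) (hx : x % 2 = 1) :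
    ∃ l1 l2, xs.filter (fun z => z % 2 != 0) = l1 ++ r :: l2 ∧
      (xs.set k x).filter (fun z => z % 2 != 0) = l1 ++ x :: l2 := by
  induction xs generalizing k with
  | nil => simp at hget
  | cons y ys ih =>
    cases k with
    | zero =>
      have hy : y = r := by simpa using hget
      subst hy
      exact ⟨[], ys.filter (fun z => z % 2 != 0), by simp [hr],
        by simp [hx]⟩
    | succ k =>
      have hget' : ys[k]? = some r := by simpa using hget
      obtain ⟨l1, l2, h1, h2⟩ := ih k hget'
      by_cases hy : y % 2 = 0
      · exact ⟨l1, l2, by simp [hy, h1], by simp [hy, h2]⟩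
      · have hy1 : y % 2 = 1 := by rcases Int.emod_two_eq y with h | h; exact absurd h hy; exact h
        exact ⟨y :: l1, l2, by simp [hy1, h1], by simp [hy1, h2]⟩

-- the main bridge: feeding ANY sorted permutation of the odds to the positional pass
-- produces exactly the selection-sort result
theorem sel_main (n : Nat) : ∀ (lst os : List Int), lst.length ≤ n →
    os.Perm (lst.filter (fun z => z % 2 != 0)) → os.Pairwise (· ≤ ·) →
    oddSortGo lst os = selGo lst := by
  induction n with
  | zero =>
    intro lst os hlen hperm _
    have hnil : lst = [] := List.eq_nil_of_length_eq_zero (Nat.le_zero.mp hlen)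
    subst hnil
    have : os = [] := by simpa using hperm.eq_nil
    subst this
    simp [oddSortGo, selGo]
  | succ n ih =>
    intro lst os hlen hperm hpw
    match lst with
    | [] =>
      have : os = [] := by simpa using hperm.eq_nil
      subst this
      simp [oddSortGo, selGo]
    | x :: xs =>
      have hlen' : xs.length ≤ n := by simpa using Nat.le_of_succ_le_succ hlen
      rcases Int.emod_two_eq x with hx | hx
      · -- even head: both keep x and recurse
        have hf : (x :: xs).filter (fun z => z % 2 != 0) = xs.filter (fun z => z % 2 != 0) := by
          simp [hx]
        rw [hf] at hperm
        have hrec := ih xs os hlen' hperm hpw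
        simp [oddSortGo, selGo, hx, hrec]
      · -- odd head
        have hf : (x :: xs).filter (fun z => z % 2 != 0)
            = x :: xs.filter (fun z => z % 2 != 0) := by
          simp [hx]
        rw [hf] at hperm
        cases os with
        | nil => exact absurd hperm.symm.eq_nil (by simp)
        | cons o os' =>
          have hmin : ∀ z ∈ x :: xs.filter (fun z => z % 2 != 0), o ≤ z := by
            intro z hz
            have hz' : z ∈ o :: os' := hperm.symm.subset hz
            rcases List.mem_cons.mp hz' with rfl | h
            · exact le_refl z
            · exact (List.pairwise_cons.mp hpw).1 z h
          have homem : o ∈ x :: xs.filter (fun z => z % 2 != 0) :=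
            hperm.subset (List.mem_cons_self)
          have hpw' : os'.Pairwise (· ≤ ·) := (List.pairwise_cons.mp hpw).2
          rcases selScan_spec xs 0 x none with ⟨heq, hge⟩ | ⟨k, r, hget, hrodd, hrlt, heq, hge⟩
          · -- nothing beat x: x is the minimum odd, so o = x
            have hox : o = x := by
              have h1 : o ≤ x := hmin x List.mem_cons_self
              rcases List.mem_cons.mp homem with rfl | h
              · rfl
              · have hmem := List.mem_filter.mp h
                have hodd : o % 2 = 1 := by
                  rcases Int.emod_two_eq o with h0 | h0
                  · exfalso; revert hmem; simp [h0]
                  · exact h0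
                exact le_antisymm h1 (hge o hmem.1 hodd)
            subst hox
            have hperm' : os'.Perm (xs.filter (fun z => z % 2 != 0)) := hperm.cons_inv
            have hrec := ih xs os' hlen' hperm' hpw'
            simp [oddSortGo, selGo, hx, heq, hrec]
          · -- the minimum odd r sits at offset k in xs; o = r, and the swap puts x there
            have hrmem : r ∈ x :: xs.filter (fun z => z % 2 != 0) :=
              List.mem_cons_of_mem x (List.mem_filter.mpr
                ⟨List.mem_of_getElem? hget, by simp [hrodd]⟩)
            have hor : o = r := by
              refine le_antisymm (hmin r hrmem) ?_
              rcases List.mem_cons.mp homem with rfl | h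
              · exact le_of_lt hrlt
              · have hmem := List.mem_filter.mp h
                have hodd : o % 2 = 1 := by
                  rcases Int.emod_two_eq o with h0 | h0
                  · exfalso; revert hmem; simp [h0]
                  · exact h0
                exact hge o hmem.1 hodd
            obtain ⟨l1, l2, hfl1, hfl2⟩ := filter_set xs k r x hget hrodd hx
            have hperm' : os'.Perm ((xs.set k x).filter (fun z => z % 2 != 0)) := by
              have hperm0 : (r :: os').Perm (x :: (l1 ++ r :: l2)) := by
                rw [← hfl1]; exact hor ▸ hperm
              have hp1 : (x :: (l1 ++ r :: l2)).Perm (x :: (r :: (l1 ++ l2))) :=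
                List.Perm.cons x List.perm_middle
              have hp2 : (x :: r :: (l1 ++ l2)).Perm (r :: x :: (l1 ++ l2)) :=
                List.Perm.swap r x (l1 ++ l2)
              have h2 : os'.Perm (x :: (l1 ++ l2)) := ((hperm0.trans hp1).trans hp2).cons_inv
              rw [hfl2]
              exact h2.trans List.perm_middle.symm
            have hrec := ih (xs.set k x) os' (by simpa using hlen') hperm' hpw'
            have hset := oddSortGo_set xs k r x hget hrodd hx os'
            simp [oddSortGo, selGo, hx, heq, ← hset, hrec, hor]

-- ===== VERDICT (by name: the statement is the Claim_ definition above) =====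
theorem odd_sort_spec : Claim_equal_odd_sort := by
  intro lst _
  show odd_sort lst = odd_sort_alt lst
  have hA : odd_sort lst
      = oddSortGo lst (PySem.List.sorted (lst.filter (fun z => z % 2 != 0)) (fun z => z) false) := by
    unfold odd_sort
    simp only [pv_mod2]
    exact pv_core lst _ (by rw [PySem.List.length_sorted])
  rw [hA]
  exact sel_main lst.length lst _ (le_refl _)
    (PySem.List.sorted_perm _ _ _)
    (by simpa using PySem.List.sorted_pairwise (xs := lst.filter (fun z => z % 2 != 0)) (key := fun z => z))
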